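-- pv_equiv track=rewrite | github.com/lMoonHawk/AoC-py | 2023/day_12.py | combin
-- ===== SOURCE A (Python) =====
-- def combin(spr, grps, memo={}):
--     if (spr, grps) in memo:
--         return memo[(spr, grps)]
--     if not spr:
--         return 1 if not grps else 0
--     if not grps:
--         return 1 if "#" not in spr else 0
--
--     result = 0
--
--     if spr[0] in [".", "?"]:
--         result += combin(spr[1:], grps)
--     if spr[0] in ["#", "?"]:
--         can_grp = grps[0] <= len(spr) and "." not in spr[: grps[0]]
--         if can_grp and (grps[0] == len(spr) or spr[grps[0]] != "#"):
--             result += combin(spr[grps[0] + 1 :], grps[1:])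
--
--     memo[(spr, grps)] = result
--     return result
-- ===== SOURCE B (Python) =====
-- def combin(spr, grps, memo={}):
--     # B: bottom-up index DP over suffix positions (no recursion, no per-state
--     # string slicing). Note A's recursive calls use the mutable DEFAULT memo,
--     # never the passed-in one, and that default only ever holds values the pure
--     # recursion itself produced, so a passed memo only matters at the exact top
--     # key. Like A, B stores its result in the passed memo (same side effect);
--     # the proved equivalence is about the return value.
--     if (spr, grps) in memo:
--         return memo[(spr, grps)]
--     n, m = len(spr), len(grps)
--     bottom = [1 if j == m else 0 for j in range(m + 1)]
--     rows = [bottom]          # rows[-1 - k] is the DP row for suffix position i + 1 + k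
--     has_hash = False         # '#' occurs in spr[i:]
--     next_dot = n             # least index >= i with spr[index] == '.', else n
--     for i in range(n - 1, -1, -1):
--         c = spr[i]
--         if c == '.':
--             next_dot = i
--         if c == '#':
--             has_hash = True
--         row = []
--         for j in range(m + 1):
--             if j == m:
--                 row.append(0 if has_hash else 1)
--             else:
--                 res = 0
--                 if c in '.?':
--                     res += rows[-1][j]
--                 if c in '#?':
--                     g = grps[j]
--                     if 0 <= g <= n - i and next_dot >= i + g:
--                         if g == n - i:
--                             res += rows[-g][j + 1]
--                         elif spr[i + g] != '#':
--                             res += rows[-1 - g][j + 1]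
--                 row.append(res)
--         rows.append(row)
--     result = rows[-1][0]
--     memo[(spr, grps)] = result
--     return result
-- ===== Notes on version B (the rewrite author's own statement) =====
-- stated objective: alternative
-- what changed: Top-down memoized recursion with per-state string slicing/hashing replaced by a single bottom-up index DP over (i,j) suffix positions, threading incremental has-hash and next-dot markers instead of rescanning slices; A only visits reachable states, B fills the whole table, so B is not faster on random inputs.
-- outside the precondition, e.g. on combin('?', (-1,), {}): A returns 1, B returns 0; on combin('#.', (-1,), {}): A returns 0, B returns 0
import Mathlib
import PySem

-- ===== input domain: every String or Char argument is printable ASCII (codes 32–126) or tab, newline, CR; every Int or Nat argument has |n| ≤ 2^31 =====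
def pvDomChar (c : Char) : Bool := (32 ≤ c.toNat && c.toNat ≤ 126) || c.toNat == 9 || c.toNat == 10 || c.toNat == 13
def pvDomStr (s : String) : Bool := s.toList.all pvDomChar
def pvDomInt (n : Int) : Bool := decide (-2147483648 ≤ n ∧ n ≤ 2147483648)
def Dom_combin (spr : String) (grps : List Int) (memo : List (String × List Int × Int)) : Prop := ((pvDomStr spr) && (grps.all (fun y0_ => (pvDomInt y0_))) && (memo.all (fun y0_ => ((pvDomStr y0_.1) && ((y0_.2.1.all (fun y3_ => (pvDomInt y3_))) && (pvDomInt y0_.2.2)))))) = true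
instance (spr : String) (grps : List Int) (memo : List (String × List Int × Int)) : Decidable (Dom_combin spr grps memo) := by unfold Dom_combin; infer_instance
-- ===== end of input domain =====

-- B (bottom-up index DP, same cost class, no per-state slicing) replaces A's memoized recursion; the
-- claim is about the return value only (both Pythons store the result into the passed memo;
-- A's recursive calls use the mutable DEFAULT memo, which only ever holds values the pure
-- recursion itself produces, so it is modelled as starting empty).

-- ===== PORT A =====
-- the passed memo, a Python dict keyed by (spr, grps): first-match association list per convention
def memoDict (memo : List (String × List Int × Int)) : PySem.Dict (List Char × List Int) Int :=
  PySem.Dict.mk (memo.map (fun e => ((e.1.toList, e.2.1), e.2.2)))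

-- needed for the termination proof of combinAux (cited in decreasing_by)
theorem slice_from_length_le {α : Type} (xs : List α) (a : Int) :
    (PySem.List.slice xs (some a) none).length ≤ xs.length := by
  rw [PySem.List.slice_some_none]; simp

-- A's recursion with the default memo threaded through (recursive calls pass no memo argument)
def combinAux (s : List Char) (g : List Int) (d : PySem.Dict (List Char × List Int) Int) :
    Int × PySem.Dict (List Char × List Int) Int :=
  match d.get? (s, g) with
  | some v => (v, d)
  | none =>
    match s, g with
    | [], g' => ((if g' = [] then 1 else 0), d)
    | c :: stl, [] => ((if PySem.Chars.isIn ['#'] (c :: stl) then 0 else 1), d)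
    | c :: stl, g0 :: gtl =>
      -- spr[1:] of a nonempty string is its tail
      let pr1 := if c = '.' ∨ c = '?' then combinAux stl (g0 :: gtl) d else (0, d)
      let canGrp := g0 ≤ ((c :: stl).length : Int) ∧
        PySem.Chars.isIn ['.'] (PySem.List.slice (c :: stl) none (some g0)) = false
      -- spr[grps[0]]: pyGet? none = IndexError (outside Pre_); the default '#' is never used inside Pre_
      let pr2 := if (c = '#' ∨ c = '?') ∧ canGrp ∧
          (g0 = ((c :: stl).length : Int) ∨ (PySem.List.pyGet? (c :: stl) g0).getD '#' ≠ '#')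
        then combinAux (PySem.List.slice (c :: stl) (some (g0 + 1)) none) gtl pr1.2
        else (0, pr1.2)
      let result := pr1.1 + pr2.1
      (result, pr2.2.insert (c :: stl, g0 :: gtl) result)
termination_by s.length + g.length
decreasing_by
  all_goals first
  | (simp; omega)
  | (have h := slice_from_length_le (c :: stl) (g0 + 1); simp at h ⊢; try omega)

def combinCore (cs : List Char) (grps : List Int) (memo : List (String × List Int × Int)) : Int :=
  match (memoDict memo).get? (cs, grps) with
  | some v => v
  | none =>
    match cs, grps with
    | [], g' => if g' = [] then 1 else 0
    | c :: stl, [] => if PySem.Chars.isIn ['#'] (c :: stl) then 0 else 1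
    | c :: stl, g0 :: gtl =>
      let pr1 := if c = '.' ∨ c = '?' then combinAux stl (g0 :: gtl) PySem.Dict.empty
                 else (0, PySem.Dict.empty)
      let canGrp := g0 ≤ ((c :: stl).length : Int) ∧
        PySem.Chars.isIn ['.'] (PySem.List.slice (c :: stl) none (some g0)) = false
      let pr2 := if (c = '#' ∨ c = '?') ∧ canGrp ∧
          (g0 = ((c :: stl).length : Int) ∨ (PySem.List.pyGet? (c :: stl) g0).getD '#' ≠ '#')
        then combinAux (PySem.List.slice (c :: stl) (some (g0 + 1)) none) gtl pr1.2
        else (0, pr1.2)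
      pr1.1 + pr2.1

def combin (spr : String) (grps : List Int) (memo : List (String × List Int × Int)) : Int :=
  combinCore spr.toList grps memo

-- ===== PORT B =====
-- the bottom DP row (suffix position n) and the body of B's downward loop over i
def altBottom (grps : List Int) : List Int :=
  (PySem.List.pyRange 0 ((grps.length : Int) + 1) 1).map
    (fun j => if j = (grps.length : Int) then (1 : Int) else 0)

-- Source B appends rows and reads them from the end (rows[-1 - k]); the port keeps the same
-- sequence newest-first, so Python's rows[-1 - k] is pyGetD rows k here (value-exact)
def altStep (cs : List Char) (grps : List Int) (st : List (List Int) × Bool × Int) (i : Int) :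
    List (List Int) × Bool × Int :=
  let n : Int := cs.length
  let m : Int := grps.length
  let rows := st.1
  let c := PySem.List.pyGetD cs i ' '
  let nd := if c = '.' then i else st.2.2
  let hh := if c = '#' then true else st.2.1
  let row := (PySem.List.pyRange 0 (m + 1) 1).map (fun j =>
    if j = m then (if hh then (0 : Int) else 1)
    else
      let r1 := if c = '.' ∨ c = '?' then PySem.List.pyGetD (PySem.List.pyGetD rows 0 []) j 0 else 0
      let g := PySem.List.pyGetD grps j 0
      let r2 := if (c = '#' ∨ c = '?') ∧ 0 ≤ g ∧ g ≤ n - i ∧ i + g ≤ nd then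
          (if g = n - i then PySem.List.pyGetD (PySem.List.pyGetD rows (g - 1) []) (j + 1) 0
           else if (PySem.List.pyGetD cs (i + g) ' ') ≠ '#' then
             PySem.List.pyGetD (PySem.List.pyGetD rows g []) (j + 1) 0
           else 0)
        else 0
      r1 + r2)
  (row :: rows, hh, nd)

def combinAltCore (cs : List Char) (grps : List Int) (memo : List (String × List Int × Int)) : Int :=
  match (memoDict memo).get? (cs, grps) with
  | some v => v
  | none =>
    let n : Int := cs.length
    let st := (PySem.List.pyRange (n - 1) (-1) (-1)).foldl (altStep cs grps)
      ([altBottom grps], false, n)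
    PySem.List.pyGetD (PySem.List.pyGetD st.1 0 []) 0 0

def combin_alt (spr : String) (grps : List Int) (memo : List (String × List Int × Int)) : Int :=
  combinAltCore spr.toList grps memo

-- ===== PRECONDITION & SPEC =====
-- Pre_ restricts to the function's natural domain: group sizes must be nonnegative whenever
-- spr contains a spring character '#' or '?' (only then can a group be placed). With a negative
-- group and a spring character A can raise IndexError (negative-index wraparound in spr[grps[0]]),
-- and where it does return, the value comes from that wraparound / empty-slice accident.
def Pre_combin (spr : String) (grps : List Int) (memo : List (String × List Int × Int)) : Prop :=
  (∀ x ∈ grps, 0 ≤ x) ∨ ∀ c ∈ spr.toList, c ≠ '#' ∧ c ≠ '?'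
instance (spr : String) (grps : List Int) (memo : List (String × List Int × Int)) : Decidable (Pre_combin spr grps memo) := by unfold Pre_combin; infer_instance

def pvWitness_combin : String × List Int × (List (String × List Int × Int)) :=
  ("?#?.#", [2, 1], [("#?.#", [1], 3)])

def Spec_combin (spr : String) (grps : List Int) (memo : List (String × List Int × Int)) (out : Int) : Prop := out = combin_alt spr grps memo
instance (spr : String) (grps : List Int) (memo : List (String × List Int × Int)) (out : Int) : Decidable (Spec_combin spr grps memo out) := by unfold Spec_combin; infer_instance

-- ===== CLAIM (what is proved, stated in full; the proofs are below) =====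
def Claim_equal_combin : Prop := ∀ (spr : String) (grps : List Int) (memo : List (String × List Int × Int)), Dom_combin spr grps memo → Pre_combin spr grps memo → Spec_combin spr grps memo (combin spr grps memo)

-- ===== LEMMAS AND PROOFS =====

-- the pure value of A's recursion (what the default memo always holds)
def P : List Char → List Int → Int
  | [], g' => if g' = [] then 1 else 0
  | c :: stl, [] => if PySem.Chars.isIn ['#'] (c :: stl) then 0 else 1
  | c :: stl, g0 :: gtl =>
    (if c = '.' ∨ c = '?' then P stl (g0 :: gtl) else 0) +
    (if (c = '#' ∨ c = '?') ∧ (g0 ≤ ((c :: stl).length : Int) ∧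
          PySem.Chars.isIn ['.'] (PySem.List.slice (c :: stl) none (some g0)) = false) ∧
        (g0 = ((c :: stl).length : Int) ∨ (PySem.List.pyGet? (c :: stl) g0).getD '#' ≠ '#')
      then P (PySem.List.slice (c :: stl) (some (g0 + 1)) none) gtl
      else 0)
termination_by s g => s.length + g.length
decreasing_by
  all_goals first
  | (simp; omega)
  | (have h := slice_from_length_le (c :: stl) (g0 + 1); simp at h ⊢; try omega)

def InvP (d : PySem.Dict (List Char × List Int) Int) : Prop :=
  ∀ s g v, d.get? (s, g) = some v → v = P s g

theorem invP_empty : InvP PySem.Dict.empty := by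
  intro s g v h
  simp [PySem.Dict.empty, PySem.Dict.get?] at h

theorem combinAux_nil (g : List Int) (d : PySem.Dict (List Char × List Int) Int) (hd : InvP d) :
    (combinAux [] g d).1 = P [] g ∧ InvP (combinAux [] g d).2 := by
  cases hm : d.get? (([] : List Char), g) with
  | some v => rw [combinAux, hm]; exact ⟨hd _ _ _ hm, hd⟩
  | none => rw [combinAux, hm, P]; exact ⟨rfl, hd⟩

theorem combinAux_cons_nil (c : Char) (stl : List Char) (d : PySem.Dict (List Char × List Int) Int)
    (hd : InvP d) :
    (combinAux (c :: stl) [] d).1 = P (c :: stl) [] ∧ InvP (combinAux (c :: stl) [] d).2 := by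
  cases hm : d.get? ((c :: stl), ([] : List Int)) with
  | some v => rw [combinAux, hm]; exact ⟨hd _ _ _ hm, hd⟩
  | none => rw [combinAux, hm, P]; exact ⟨rfl, hd⟩

-- the shared cons/cons body of A's function (with and without the memo store)
theorem body_lemma (c : Char) (stl : List Char) (g0 : Int) (gtl : List Int)
    (d : PySem.Dict (List Char × List Int) Int) (hd : InvP d)
    (ih : ∀ s' g' d', s'.length + g'.length < (c :: stl).length + (g0 :: gtl).length →
      InvP d' → (combinAux s' g' d').1 = P s' g' ∧ InvP (combinAux s' g' d').2) :
    (let pr1 := if c = '.' ∨ c = '?' then combinAux stl (g0 :: gtl) d else (0, d)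
     let pr2 := if (c = '#' ∨ c = '?') ∧ (g0 ≤ ((c :: stl).length : Int) ∧
          PySem.Chars.isIn ['.'] (PySem.List.slice (c :: stl) none (some g0)) = false) ∧
          (g0 = ((c :: stl).length : Int) ∨ (PySem.List.pyGet? (c :: stl) g0).getD '#' ≠ '#')
        then combinAux (PySem.List.slice (c :: stl) (some (g0 + 1)) none) gtl pr1.2
        else (0, pr1.2)
     pr1.1 + pr2.1) = P (c :: stl) (g0 :: gtl) ∧
    InvP (let pr1 := if c = '.' ∨ c = '?' then combinAux stl (g0 :: gtl) d else (0, d)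
     let pr2 := if (c = '#' ∨ c = '?') ∧ (g0 ≤ ((c :: stl).length : Int) ∧
          PySem.Chars.isIn ['.'] (PySem.List.slice (c :: stl) none (some g0)) = false) ∧
          (g0 = ((c :: stl).length : Int) ∨ (PySem.List.pyGet? (c :: stl) g0).getD '#' ≠ '#')
        then combinAux (PySem.List.slice (c :: stl) (some (g0 + 1)) none) gtl pr1.2
        else (0, pr1.2)
     pr2.2) := by
  have hpr1 : (if c = '.' ∨ c = '?' then combinAux stl (g0 :: gtl) d else ((0 : Int), d)).1 =
      (if c = '.' ∨ c = '?' then P stl (g0 :: gtl) else 0) ∧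
      InvP (if c = '.' ∨ c = '?' then combinAux stl (g0 :: gtl) d else ((0 : Int), d)).2 := by
    by_cases h1 : c = '.' ∨ c = '?'
    · rw [if_pos h1, if_pos h1]
      exact ih stl (g0 :: gtl) d (by simp only [List.length_cons]; omega) hd
    · rw [if_neg h1, if_neg h1]; exact ⟨rfl, hd⟩
  dsimp only
  obtain ⟨h11, h12⟩ := hpr1
  rw [P, h11]
  set d1 := (if c = '.' ∨ c = '?' then combinAux stl (g0 :: gtl) d else ((0 : Int), d)).2 with hd1
  by_cases h2 : (c = '#' ∨ c = '?') ∧ (g0 ≤ ((c :: stl).length : Int) ∧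
      PySem.Chars.isIn ['.'] (PySem.List.slice (c :: stl) none (some g0)) = false) ∧
      (g0 = ((c :: stl).length : Int) ∨ (PySem.List.pyGet? (c :: stl) g0).getD '#' ≠ '#')
  · rw [if_pos h2, if_pos h2]
    have hm : (PySem.List.slice (c :: stl) (some (g0 + 1)) none).length + gtl.length <
        (c :: stl).length + (g0 :: gtl).length := by
      have h := slice_from_length_le (c :: stl) (g0 + 1)
      simp at h ⊢; omega
    obtain ⟨h21, h22⟩ := ih _ gtl d1 hm h12
    rw [h21]
    exact ⟨rfl, h22⟩
  · rw [if_neg h2, if_neg h2]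
    exact ⟨rfl, h12⟩

theorem combinAux_P (s : List Char) (g : List Int) (d : PySem.Dict (List Char × List Int) Int)
    (hd : InvP d) : (combinAux s g d).1 = P s g ∧ InvP (combinAux s g d).2 := by
  have main : ∀ (N : Nat) (s : List Char) (g : List Int) d, s.length + g.length ≤ N → InvP d →
      (combinAux s g d).1 = P s g ∧ InvP (combinAux s g d).2 := by
    intro N
    induction N with
    | zero =>
      intro s g d hlen hd
      match s, g with
      | [], g => exact combinAux_nil g d hd
      | c :: stl, g => simp at hlen
    | succ N ihN =>
      intro s g d hlen hd
      match s, g with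
      | [], g => exact combinAux_nil g d hd
      | c :: stl, [] => exact combinAux_cons_nil c stl d hd
      | c :: stl, g0 :: gtl =>
        have ih : ∀ s' g' d', s'.length + g'.length < (c :: stl).length + (g0 :: gtl).length →
            InvP d' → (combinAux s' g' d').1 = P s' g' ∧ InvP (combinAux s' g' d').2 := by
          intro s' g' d' hlt hd'
          exact ihN s' g' d' (by simp at hlen hlt ⊢; omega) hd'
        have hb := body_lemma c stl g0 gtl d hd ih
        cases hm : d.get? ((c :: stl), (g0 :: gtl)) with
        | some v => rw [combinAux, hm]; exact ⟨hd _ _ _ hm, hd⟩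
        | none =>
          rw [combinAux, hm]
          dsimp only at hb ⊢
          refine ⟨hb.1, ?_⟩
          intro s' g' v hv
          by_cases hk : (s', g') = ((c :: stl), (g0 :: gtl))
          · obtain ⟨hs', hg'⟩ := Prod.ext_iff.mp hk
            dsimp only at hs' hg'
            subst hs'; subst hg'
            rw [PySem.Dict.get?_insert_self] at hv
            cases hv
            exact hb.1
          · rw [PySem.Dict.get?_insert_of_ne _ _ hk] at hv
            exact hb.2 _ _ _ hv
  exact main (s.length + g.length) s g d le_rfl hd

theorem combin_eq_P (cs : List Char) (grps : List Int) (memo : List (String × List Int × Int)) :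
    combinCore cs grps memo =
      match (memoDict memo).get? (cs, grps) with
      | some v => v
      | none => P cs grps := by
  unfold combinCore
  cases hm : (memoDict memo).get? (cs, grps) with
  | some v => rfl
  | none =>
    dsimp only
    cases cs with
    | nil =>
      cases grps with
      | nil => rw [P]
      | cons g0 gtl => rw [P]
    | cons c stl =>
      cases grps with
      | nil => rw [P]
      | cons g0 gtl =>
        have ih : ∀ s' g' d', s'.length + g'.length < (c :: stl).length + (g0 :: gtl).length →
            InvP d' → (combinAux s' g' d').1 = P s' g' ∧ InvP (combinAux s' g' d').2 := by
          intro s' g' d' _ hd'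
          exact combinAux_P s' g' d' hd'
        have hb := (body_lemma c stl g0 gtl PySem.Dict.empty invP_empty ih).1
        dsimp only at hb ⊢
        exact hb

-- ---- B-side: the DP rows are the pure values P on suffix pairs ----

-- row of pure values at suffix position i
def Rrow (cs : List Char) (grps : List Int) (i : Nat) : List Int :=
  (PySem.List.pyRange 0 ((grps.length : Int) + 1) 1).map
    (fun j => P (cs.drop i) (grps.drop j.toNat))

-- index of the first '.' at position ≥ i (cs.length if none)
def ndVal (cs : List Char) (i : Nat) : Int := ((i + (cs.drop i).findIdx (· == '.') : Nat) : Int)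

def StInv (cs : List Char) (grps : List Int) (i : Nat) (st : List (List Int) × Bool × Int) : Prop :=
  st.1 = (List.range (cs.length - i + 1)).map (fun k => Rrow cs grps (i + k)) ∧
  st.2.1 = (cs.drop i).contains '#' ∧
  st.2.2 = ndVal cs i

theorem Rrow_get (cs : List Char) (grps : List Int) (i : Nat) (j : Int) (h0 : 0 ≤ j)
    (hm : j ≤ (grps.length : Int)) :
    PySem.List.pyGetD (Rrow cs grps i) j 0 = P (cs.drop i) (grps.drop j.toNat) := by
  unfold Rrow
  rw [PySem.List.pyGetD_of_nonneg _ _ h0, List.getD_eq_getElem?_getD, List.getElem?_map,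
    PySem.List.getElem?_pyRange_one]
  rw [if_pos (by omega)]
  simp
  rw [show max j 0 = j by omega]

theorem bottom_eq (cs : List Char) (grps : List Int) :
    altBottom grps = Rrow cs grps cs.length := by
  unfold altBottom Rrow
  rw [List.drop_length]
  refine List.map_congr_left ?_
  intro j hj
  rw [PySem.List.mem_pyRange_one] at hj
  rw [P]
  by_cases hjm : j = (grps.length : Int)
  · rw [if_pos hjm, if_pos (by rw [List.drop_eq_nil_iff]; omega)]
  · rw [if_neg hjm, if_neg (by rw [List.drop_eq_nil_iff]; omega)]

theorem dot_take (t : List Char) : ∀ k, k ≤ t.length →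
    ('.' ∈ t.take k ↔ t.findIdx (· == '.') < k) := by
  induction t with
  | nil => intro k hk; simp at hk; simp [hk]
  | cons c t' ih =>
    intro k hk
    cases k with
    | zero => simp
    | succ k' =>
      rw [List.take_succ_cons, List.mem_cons, List.findIdx_cons]
      by_cases hc : c = '.'
      · simp [hc]
      · have : (c == '.') = false := by simp [hc]
        rw [this]
        simp only [cond_false]
        constructor
        · intro hmem
          rcases hmem with h | h
          · exact absurd h.symm hc
          · have := (ih k' (by simp at hk; omega)).mp h; omega
        · intro hlt
          exact Or.inr ((ih k' (by simp at hk; omega)).mpr (by omega))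

theorem rows_map_get (cs : List Char) (grps : List Int) (b L : Nat) (k : Int) (hk0 : 0 ≤ k)
    (hkL : k < (L : Int)) :
    PySem.List.pyGetD ((List.range L).map (fun t => Rrow cs grps (b + t))) k [] =
    Rrow cs grps (b + k.toNat) := by
  rw [PySem.List.pyGetD_of_nonneg _ _ hk0, List.getD_eq_getElem?_getD, List.getElem?_map,
    List.getElem?_range (by omega)]
  simp

theorem step_inv (cs : List Char) (grps : List Int)
    (hpre : (∀ x ∈ grps, 0 ≤ x) ∨ ∀ c ∈ cs, c ≠ '#' ∧ c ≠ '?') (i : Nat)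
    (hi : i < cs.length) (st : List (List Int) × Bool × Int)
    (h : StInv cs grps (i + 1) st) : StInv cs grps i (altStep cs grps st (i : Int)) := by
  obtain ⟨hr, hh, hn⟩ := h
  have hc : PySem.List.pyGetD cs (i : Int) ' ' = cs[i] := by
    rw [PySem.List.pyGetD_natCast, List.getD_eq_getElem _ _ hi]
  have hdrop : cs.drop i = cs[i] :: cs.drop (i + 1) := List.drop_eq_getElem_cons hi
  have htlen : (((cs.drop i).length : Nat) : Int) = (cs.length : Int) - i := by
    simp [List.length_drop]; omega
  have hndnew : (if cs[i] = '.' then (i : Int) else ndVal cs (i + 1)) = ndVal cs i := by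
    unfold ndVal
    rw [hdrop, List.findIdx_cons]
    by_cases hch : cs[i] = '.'
    · have hb : (cs[i] == '.') = true := by simp [hch]
      rw [if_pos hch, hb]
      simp
    · have hb : (cs[i] == '.') = false := by simp [hch]
      rw [if_neg hch, hb]
      simp only [cond_false]
      push_cast; ring
  have hhnew : (if cs[i] = '#' then true else (cs.drop (i + 1)).contains '#') =
      (cs.drop i).contains '#' := by
    by_cases hch : cs[i] = '#'
    · rw [if_pos hch, List.contains_eq_mem]
      exact (decide_eq_true (by rw [hdrop]; exact hch ▸ List.mem_cons_self ..)).symm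
    · rw [if_neg hch, List.contains_eq_mem, List.contains_eq_mem, decide_eq_decide, hdrop,
        List.mem_cons]
      exact ⟨Or.inr, fun h => h.resolve_left (fun hx => hch hx.symm)⟩
  unfold altStep
  dsimp only
  rw [hc, hh, hn, hhnew, hndnew, hr]
  refine ⟨?_, rfl, rfl⟩
  · -- rows component
    dsimp only
    have hRHS : (List.range (cs.length - i + 1)).map (fun k => Rrow cs grps (i + k)) =
        Rrow cs grps i ::
          (List.range (cs.length - (i + 1) + 1)).map (fun k => Rrow cs grps (i + 1 + k)) := by
      rw [show cs.length - i + 1 = (cs.length - (i + 1) + 1) + 1 by omega, List.range_succ_eq_map,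
        List.map_cons, List.map_map]
      congr 1
      refine List.map_congr_left ?_
      intro k _
      simp only [Function.comp_apply]
      rw [show i + Nat.succ k = i + 1 + k by omega]
    rw [hRHS]
    congr 1
    · -- the new row is the row of pure values at position i
      rw [show Rrow cs grps i = List.map (fun j => P (cs.drop i) (grps.drop j.toNat))
          (PySem.List.pyRange 0 ((grps.length : Int) + 1) 1) from rfl]
      refine List.map_congr_left ?_
      intro j hjmem
      rw [PySem.List.mem_pyRange_one] at hjmem
      obtain ⟨hj0, hjlt⟩ := hjmem
      by_cases hjm : j = (grps.length : Int)
      · -- last column: no groups left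
        rw [if_pos hjm, show j.toNat = grps.length by omega, List.drop_length, hdrop, P,
          ← hdrop]
        by_cases hx : '#' ∈ cs.drop i
        · rw [if_pos (by simp [List.contains_eq_mem, hx]),
            if_pos ((PySem.Chars.isIn_iff_infix _ _).mpr ((List.singleton_infix_iff _ _).mpr hx))]
        · rw [if_neg (by simp [List.contains_eq_mem, hx]),
            if_neg (by rw [Bool.not_eq_true, PySem.Chars.isIn_eq_false_iff,
              List.singleton_infix_iff]; exact hx)]
      · -- inner column
        have hjm' : j.toNat < grps.length := by omega
        have hgd : grps.drop j.toNat = grps[j.toNat] :: grps.drop (j.toNat + 1) :=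
          List.drop_eq_getElem_cons hjm'
        have hgj : PySem.List.pyGetD grps j 0 = grps[j.toNat] := by
          rw [PySem.List.pyGetD_of_nonneg _ _ hj0]
          exact List.getD_eq_getElem _ _ hjm'
        rw [if_neg hjm]
        rw [hgj, hdrop, hgd, P, ← hdrop]
        congr 1
        · -- the '.'/'?' branch
          by_cases h1 : cs[i] = '.' ∨ cs[i] = '?'
          · rw [if_pos h1, if_pos h1,
              rows_map_get cs grps (i + 1) _ 0 le_rfl (by omega),
              show i + 1 + (0 : Int).toNat = i + 1 by omega,
              Rrow_get cs grps (i + 1) j hj0 (by omega), hgd]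
          · rw [if_neg h1, if_neg h1]
        · -- the '#'/'?' branch
          set g0 : Int := grps[j.toNat]
          by_cases hcq : cs[i] = '#' ∨ cs[i] = '?'
          swap
          · have hB : ¬((cs[i] = '#' ∨ cs[i] = '?') ∧ 0 ≤ g0 ∧ g0 ≤ (cs.length : Int) - i ∧
                (i : Int) + g0 ≤ ndVal cs i) := fun hx => hcq hx.1
            have hP : ¬((cs[i] = '#' ∨ cs[i] = '?') ∧ (g0 ≤ (((cs.drop i).length : Nat) : Int) ∧
                PySem.Chars.isIn ['.'] (PySem.List.slice (cs.drop i) none (some g0)) = false) ∧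
                (g0 = (((cs.drop i).length : Nat) : Int) ∨
                  (PySem.List.pyGet? (cs.drop i) g0).getD '#' ≠ '#')) := fun hx => hcq hx.1
            rw [if_neg hB, if_neg hP]
          have h0g : (0 : Int) ≤ g0 := by
            rcases hpre with hgs | hns
            · exact hgs _ (List.getElem_mem hjm')
            · rcases hcq with hx | hx
              · exact absurd hx (hns _ (List.getElem_mem hi)).1
              · exact absurd hx (hns _ (List.getElem_mem hi)).2
          by_cases hle : g0 ≤ (cs.length : Int) - i
          swap
          · have hB : ¬((cs[i] = '#' ∨ cs[i] = '?') ∧ 0 ≤ g0 ∧ g0 ≤ (cs.length : Int) - i ∧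
                (i : Int) + g0 ≤ ndVal cs i) := fun hx => hle hx.2.2.1
            have hP : ¬((cs[i] = '#' ∨ cs[i] = '?') ∧ (g0 ≤ (((cs.drop i).length : Nat) : Int) ∧
                PySem.Chars.isIn ['.'] (PySem.List.slice (cs.drop i) none (some g0)) = false) ∧
                (g0 = (((cs.drop i).length : Nat) : Int) ∨
                  (PySem.List.pyGet? (cs.drop i) g0).getD '#' ≠ '#')) :=
              fun hx => hle (htlen ▸ hx.2.1.1)
            rw [if_neg hB, if_neg hP]
          have hkle : g0.toNat ≤ (cs.drop i).length := by
            simp only [List.length_drop]; omega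
          have hdoteq :
              PySem.Chars.isIn ['.'] (PySem.List.slice (cs.drop i) none (some g0)) = false ↔
              (i : Int) + g0 ≤ ndVal cs i := by
            rw [PySem.List.slice_to _ h0g, PySem.Chars.isIn_eq_false_iff,
              List.singleton_infix_iff, dot_take _ _ hkle]
            unfold ndVal
            push_cast
            omega
          by_cases hdot : (i : Int) + g0 ≤ ndVal cs i
          swap
          · have hB : ¬((cs[i] = '#' ∨ cs[i] = '?') ∧ 0 ≤ g0 ∧ g0 ≤ (cs.length : Int) - i ∧
                (i : Int) + g0 ≤ ndVal cs i) := fun hx => hdot hx.2.2.2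
            have hP : ¬((cs[i] = '#' ∨ cs[i] = '?') ∧ (g0 ≤ (((cs.drop i).length : Nat) : Int) ∧
                PySem.Chars.isIn ['.'] (PySem.List.slice (cs.drop i) none (some g0)) = false) ∧
                (g0 = (((cs.drop i).length : Nat) : Int) ∨
                  (PySem.List.pyGet? (cs.drop i) g0).getD '#' ≠ '#')) :=
              fun hx => hdot (hdoteq.mp hx.2.1.2)
            rw [if_neg hB, if_neg hP]
          have hBpos : (cs[i] = '#' ∨ cs[i] = '?') ∧ 0 ≤ g0 ∧ g0 ≤ (cs.length : Int) - i ∧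
              (i : Int) + g0 ≤ ndVal cs i := ⟨hcq, h0g, hle, hdot⟩
          by_cases hgeq : g0 = (cs.length : Int) - i
          · have hPpos : (cs[i] = '#' ∨ cs[i] = '?') ∧ (g0 ≤ (((cs.drop i).length : Nat) : Int) ∧
                PySem.Chars.isIn ['.'] (PySem.List.slice (cs.drop i) none (some g0)) = false) ∧
                (g0 = (((cs.drop i).length : Nat) : Int) ∨
                  (PySem.List.pyGet? (cs.drop i) g0).getD '#' ≠ '#') :=
              ⟨hcq, ⟨htlen ▸ hgeq.le, hdoteq.mpr hdot⟩, Or.inl (by rw [htlen]; exact hgeq)⟩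
            rw [if_pos hBpos, if_pos hgeq, if_pos hPpos,
              PySem.List.slice_from _ (by omega : (0 : Int) ≤ g0 + 1),
              List.drop_eq_nil_of_le (by simp only [List.length_drop]; omega),
              rows_map_get cs grps (i + 1) _ (g0 - 1) (by omega) (by omega),
              show i + 1 + (g0 - 1).toNat = cs.length by omega,
              Rrow_get cs grps cs.length (j + 1) (by omega) (by omega),
              List.drop_length, show (j + 1).toNat = j.toNat + 1 by omega]
          · have hglt : g0.toNat < (cs.drop i).length := by
              simp only [List.length_drop]; omega
            have hget : (PySem.List.pyGet? (cs.drop i) g0).getD '#' =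
                cs[i + g0.toNat]'(by omega) := by
              have h1 : PySem.List.pyGet? (cs.drop i) ((g0.toNat : Nat) : Int) =
                  (cs.drop i)[g0.toNat]? := PySem.List.pyGet?_natCast _ _
              rw [show ((g0.toNat : Nat) : Int) = g0 by omega] at h1
              rw [h1, List.getElem?_eq_getElem hglt]
              simp [List.getElem_drop]
            have hgetport : PySem.List.pyGetD cs ((i : Int) + g0) ' ' =
                cs[i + g0.toNat]'(by omega) := by
              rw [PySem.List.pyGetD_of_nonneg _ _ (by omega),
                show ((i : Int) + g0).toNat = i + g0.toNat by omega,
                List.getD_eq_getElem _ _ (by omega)]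
            by_cases hch : cs[i + g0.toNat]'(by omega) = '#'
            · have hP : ¬((cs[i] = '#' ∨ cs[i] = '?') ∧ (g0 ≤ (((cs.drop i).length : Nat) : Int) ∧
                  PySem.Chars.isIn ['.'] (PySem.List.slice (cs.drop i) none (some g0)) = false) ∧
                  (g0 = (((cs.drop i).length : Nat) : Int) ∨
                    (PySem.List.pyGet? (cs.drop i) g0).getD '#' ≠ '#')) := by
                rintro ⟨-, -, hx' | hx'⟩
                · exact hgeq (htlen ▸ hx')
                · rw [hget] at hx'; exact hx' hch
              have hnch : ¬(PySem.List.pyGetD cs ((i : Int) + g0) ' ' ≠ '#') := by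
                rw [hgetport]; simpa using hch
              rw [if_pos hBpos, if_neg hgeq, if_neg hnch, if_neg hP]
            · have hPpos : (cs[i] = '#' ∨ cs[i] = '?') ∧ (g0 ≤ (((cs.drop i).length : Nat) : Int) ∧
                  PySem.Chars.isIn ['.'] (PySem.List.slice (cs.drop i) none (some g0)) = false) ∧
                  (g0 = (((cs.drop i).length : Nat) : Int) ∨
                    (PySem.List.pyGet? (cs.drop i) g0).getD '#' ≠ '#') :=
                ⟨hcq, ⟨htlen ▸ hle, hdoteq.mpr hdot⟩, Or.inr (by rw [hget]; exact hch)⟩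
              have hch' : PySem.List.pyGetD cs ((i : Int) + g0) ' ' ≠ '#' := by
                rw [hgetport]; exact hch
              rw [if_pos hBpos, if_neg hgeq, if_pos hch', if_pos hPpos,
                PySem.List.slice_from _ (by omega : (0 : Int) ≤ g0 + 1),
                List.drop_drop,
                rows_map_get cs grps (i + 1) _ g0 h0g (by omega),
                Rrow_get cs grps _ (j + 1) (by omega) (by omega),
                show (j + 1).toNat = j.toNat + 1 by omega,
                show i + (g0 + 1).toNat = i + 1 + g0.toNat by omega]

theorem loop_inv (cs : List Char) (grps : List Int)
    (hpre : (∀ x ∈ grps, 0 ≤ x) ∨ ∀ c ∈ cs, c ≠ '#' ∧ c ≠ '?') :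
    ∀ (i : Nat), i ≤ cs.length → ∀ st, StInv cs grps i st →
      StInv cs grps 0 ((PySem.List.pyRange ((i : Int) - 1) (-1) (-1)).foldl (altStep cs grps) st) := by
  intro i
  induction i with
  | zero =>
    intro _ st hst
    rw [show ((0 : Nat) : Int) - 1 = -1 by norm_num, PySem.List.pyRange_neg_one_eq_nil (by norm_num)]
    exact hst
  | succ i ih =>
    intro hle st hst
    rw [show ((i + 1 : Nat) : Int) - 1 = (i : Int) by push_cast; ring,
      PySem.List.pyRange_neg_one_cons (by omega)]
    rw [List.foldl_cons]
    exact ih (by omega) _ (step_inv cs grps hpre i (by omega) st hst)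

theorem combin_alt_eq_P (cs : List Char) (grps : List Int) (memo : List (String × List Int × Int))
    (hpre : (∀ x ∈ grps, 0 ≤ x) ∨ ∀ c ∈ cs, c ≠ '#' ∧ c ≠ '?') :
    combinAltCore cs grps memo =
      match (memoDict memo).get? (cs, grps) with
      | some v => v
      | none => P cs grps := by
  unfold combinAltCore
  cases hm : (memoDict memo).get? (cs, grps) with
  | some v => rfl
  | none =>
    dsimp only
    have hinit : StInv cs grps cs.length ([altBottom grps], false, (cs.length : Int)) := by
      refine ⟨?_, ?_, ?_⟩
      · simp [bottom_eq cs grps]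
      · simp
      · simp [ndVal]
    have h0 := loop_inv cs grps hpre cs.length le_rfl _ hinit
    obtain ⟨h1, _, _⟩ := h0
    rw [h1]
    rw [show cs.length - 0 + 1 = cs.length + 1 by omega, List.range_succ_eq_map, List.map_cons]
    have hhead : PySem.List.pyGetD (Rrow cs grps (0 + 0) ::
        (List.map (fun k => Rrow cs grps (0 + k)) (List.map Nat.succ (List.range cs.length)))) 0 [] =
        Rrow cs grps 0 := by
      rw [PySem.List.pyGetD_of_nonneg _ _ le_rfl]
      simp
    rw [hhead]
    have := Rrow_get cs grps 0 0 le_rfl (by positivity)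
    simpa using this

-- ===== VERDICT (by name: the statement is the Claim_ definition above) =====
theorem combin_spec : Claim_equal_combin := by
  intro spr grps memo _hdom hpre
  unfold Spec_combin
  unfold Pre_combin at hpre
  rw [combin, combin_alt, combin_eq_P, combin_alt_eq_P spr.toList grps memo hpre]
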